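-- pv_equiv track=rewrite | github.com/NJUNLP/Knowledge-Free-Reasoning | DataGeneration/genDataArithmeticAndSymbolic.py | SplitTrainAndTest
-- ===== SOURCE A (Python) =====
-- def SplitTrainAndTest(data,TrainNum=500,TestNum=50):
--     dataNum=TrainNum+TestNum
--     train=[]
--     test=[]
--     for i in range(len(data)//dataNum):
--         train.extend(data[i*dataNum:i*dataNum+TrainNum])
--         test.extend(data[i*dataNum+TrainNum:i*dataNum+dataNum])
--     return train,test
-- ===== SOURCE B (Python) =====
-- def SplitTrainAndTest(data, TrainNum=500, TestNum=50):
--     dataNum = TrainNum + TestNum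
--     cutoff = (len(data) // dataNum) * dataNum
--     train = []
--     test = []
--     for i, x in enumerate(data[:cutoff]):
--         if i % dataNum < TrainNum:
--             train.append(x)
--         else:
--             test.append(x)
--     return train, test
-- ===== Notes on version B (the rewrite author's own statement) =====
-- stated objective: alternative
-- what changed: Replaces A's per-block double slicing loop (two list slices per block) by a single enumerate pass over the full-block prefix that routes each element to train or test by its index modulo the block size.
-- outside the precondition, e.g. on SplitTrainAndTest([1, 2, 3, 4], -1, 3): A returns ([1, 2, 3], [2, 3, 4]), B returns ([], [1, 2, 3, 4]); on SplitTrainAndTest([1, 2, 3, 4], 3, -1): A returns ([1, 2, 3, 3, 4], []), B returns ([1, 2, 3, 4], []); on SplitTrainAndTest([1, 2, 3], -2, -1): A returns ([], []), B returns ([], [1, 2, 3])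
import Mathlib
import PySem

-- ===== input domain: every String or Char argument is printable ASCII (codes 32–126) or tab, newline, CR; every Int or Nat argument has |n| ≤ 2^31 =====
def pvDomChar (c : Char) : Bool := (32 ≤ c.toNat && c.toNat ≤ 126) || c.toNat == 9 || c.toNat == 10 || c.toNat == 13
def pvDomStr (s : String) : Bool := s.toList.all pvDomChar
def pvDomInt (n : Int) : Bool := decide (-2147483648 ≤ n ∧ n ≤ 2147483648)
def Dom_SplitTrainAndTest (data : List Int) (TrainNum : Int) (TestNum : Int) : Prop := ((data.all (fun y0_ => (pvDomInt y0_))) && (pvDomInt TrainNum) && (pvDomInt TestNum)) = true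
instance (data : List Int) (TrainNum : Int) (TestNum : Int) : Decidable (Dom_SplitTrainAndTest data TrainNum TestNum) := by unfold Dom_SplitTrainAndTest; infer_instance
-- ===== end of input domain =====

-- B replaces A's per-block double slicing by a single enumerate pass that classifies each
-- element by its index modulo the block size (objective: alternative decomposition, same cost).

-- ===== PORT A =====
def SplitTrainAndTest (data : List Int) (TrainNum : Int) (TestNum : Int) : List Int × List Int :=
  let dataNum := TrainNum + TestNum
  let r :=
    (PySem.List.pyRange 0 (PySem.Int.floordiv (data.length : Int) dataNum) 1).foldl
      (fun (st : List Int × List Int) i =>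
        (st.1 ++ PySem.List.slice data (some (i * dataNum)) (some (i * dataNum + TrainNum)),
         st.2 ++ PySem.List.slice data (some (i * dataNum + TrainNum)) (some (i * dataNum + dataNum))))
      ([], [])
  r

-- ===== PORT B =====
def SplitTrainAndTest_alt (data : List Int) (TrainNum : Int) (TestNum : Int) : List Int × List Int :=
  let dataNum := TrainNum + TestNum
  let cutoff := PySem.Int.floordiv (data.length : Int) dataNum * dataNum
  (PySem.List.enumerate (PySem.List.slice data none (some cutoff)) 0).foldl
    (fun (st : List Int × List Int) p =>
      if PySem.Int.mod p.1 dataNum < TrainNum then (st.1 ++ [p.2], st.2)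
      else (st.1, st.2 ++ [p.2]))
    ([], [])

-- ===== PRECONDITION & SPEC =====
-- Pre_ restricts to the natural domain of nonnegative split sizes with TrainNum+TestNum > 0:
-- A raises ZeroDivisionError when TrainNum+TestNum == 0, and negative sizes are malformed input
-- on which Python's negative-slice wraparound makes A's value an implementation artefact.
def Pre_SplitTrainAndTest (data : List Int) (TrainNum : Int) (TestNum : Int) : Prop :=
  0 ≤ TrainNum ∧ 0 ≤ TestNum ∧ 0 < TrainNum + TestNum
instance (data : List Int) (TrainNum : Int) (TestNum : Int) : Decidable (Pre_SplitTrainAndTest data TrainNum TestNum) := by unfold Pre_SplitTrainAndTest; infer_instance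
def pvWitness_SplitTrainAndTest : List Int × Int × Int := ([1, 2, 3, 4, 5, 6, 7], 2, 1)

def Spec_SplitTrainAndTest (data : List Int) (TrainNum : Int) (TestNum : Int) (out : List Int × List Int) : Prop := out = SplitTrainAndTest_alt data TrainNum TestNum
instance (data : List Int) (TrainNum : Int) (TestNum : Int) (out : List Int × List Int) : Decidable (Spec_SplitTrainAndTest data TrainNum TestNum out) := by unfold Spec_SplitTrainAndTest; infer_instance

-- ===== CLAIM (what is proved, stated in full; the proofs are below) =====
def Claim_equal_SplitTrainAndTest : Prop := ∀ (data : List Int) (TrainNum : Int) (TestNum : Int), Dom_SplitTrainAndTest data TrainNum TestNum → Pre_SplitTrainAndTest data TrainNum TestNum → Spec_SplitTrainAndTest data TrainNum TestNum (SplitTrainAndTest data TrainNum TestNum)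

-- ===== LEMMAS AND PROOFS =====

-- A's loop: a fold of two list-appends is a pair of flatMaps.
theorem pvFoldlAppendPair {α : Type} (l : List α) (f g : α → List Int) (a b : List Int) :
    l.foldl (fun (st : List Int × List Int) i => (st.1 ++ f i, st.2 ++ g i)) (a, b)
      = (a ++ l.flatMap f, b ++ l.flatMap g) := by
  induction l generalizing a b with
  | nil => simp
  | cons x xs ih => simp [ih]

-- B's loop: a fold that routes each element by a test on its index is a pair of filters.
theorem pvFoldlRoute (dd tq : Int) (l : List (Int × Int)) (a b : List Int) :
    l.foldl
      (fun (st : List Int × List Int) p =>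
        if PySem.Int.mod p.1 dd < tq then (st.1 ++ [p.2], st.2) else (st.1, st.2 ++ [p.2]))
      (a, b)
      = (a ++ (l.filter (fun p => decide (PySem.Int.mod p.1 dd < tq))).map Prod.snd,
         b ++ (l.filter (fun p => !decide (PySem.Int.mod p.1 dd < tq))).map Prod.snd) := by
  induction l generalizing a b with
  | nil => simp
  | cons x xs ih => by_cases h : PySem.Int.mod x.1 dd < tq <;> simp [h, ih]

-- Within one block (indices m*d + s … m*d + s + |u| - 1, all below the next multiple of d),
-- the elements whose index mod d is < t form the prefix take (t-s).toNat.
theorem pvBlockFilter (d t : Int) (hd : 0 < d) :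
    ∀ (u : List Int) (m s : Int), 0 ≤ s → s + u.length ≤ d →
      (((PySem.List.enumerate u (m * d + s)).filter
          (fun p => decide (PySem.Int.mod p.1 d < t))).map Prod.snd
        = u.take (t - s).toNat
       ∧ ((PySem.List.enumerate u (m * d + s)).filter
          (fun p => !decide (PySem.Int.mod p.1 d < t))).map Prod.snd
        = u.drop (t - s).toNat) := by
  intro u
  induction u with
  | nil => intro m s _ _; simp [PySem.List.enumerate_nil]
  | cons x xs ih =>
    intro m s hs hlen
    have hmod : PySem.Int.mod (m * d + s) d = s := by
      rw [PySem.Int.mod_eq_emod_of_pos hd]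
      have h1 : (m * d + s) % d = s % d := by
        rw [add_comm, mul_comm, Int.add_mul_emod_self_left]
      have h2 : s % d = s := Int.emod_eq_of_lt hs (by simp at hlen; omega)
      rw [h1, h2]
    have hx : m * d + s + 1 = m * d + (s + 1) := by ring
    have hrec := ih m (s + 1) (by omega) (by simp at hlen ⊢; omega)
    by_cases h : s < t
    · have : (t - s).toNat = (t - (s + 1)).toNat + 1 := by omega
      simp [PySem.List.enumerate_cons, hmod, h, hx, hrec.1, hrec.2, this]
    · have h0 : (t - s).toNat = 0 := by omega
      have h1 : (t - (s + 1)).toNat = 0 := by omega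
      simp [PySem.List.enumerate_cons, hmod, h, hx, hrec.1, hrec.2, h0, h1]

-- Block decomposition: filtering the enumerate of a list of n complete blocks by
-- (index mod d < t) yields the per-block prefixes; the complement, the per-block suffixes.
theorem pvChunks (d t : Int) (ht : 0 ≤ t) (htd : t ≤ d) (hd : 0 < d) :
    ∀ (n : Nat) (p : List Int) (m : Int), p.length = n * d.toNat →
      ((((PySem.List.enumerate p (m * d)).filter
            (fun q => decide (PySem.Int.mod q.1 d < t))).map Prod.snd
          = (List.range n).flatMap (fun j => (p.drop (j * d.toNat)).take t.toNat))
       ∧ (((PySem.List.enumerate p (m * d)).filter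
            (fun q => !decide (PySem.Int.mod q.1 d < t))).map Prod.snd
          = (List.range n).flatMap
              (fun j => (p.drop (j * d.toNat + t.toNat)).take (d.toNat - t.toNat)))) := by
  intro n
  induction n with
  | zero => intro p m hp; simp at hp; simp [hp, PySem.List.enumerate_nil]
  | succ n ih =>
    intro p m hp
    have hdt : ((d.toNat : Int)) = d := Int.toNat_of_nonneg (le_of_lt hd)
    have hsplit : p = p.take d.toNat ++ p.drop d.toNat := (List.take_append_drop _ _).symm
    have hsm : (n+1) * d.toNat = n * d.toNat + d.toNat := by ring
    have hulen : (p.take d.toNat).length = d.toNat := by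
      rw [List.length_take, hp]; omega
    have hvlen : (p.drop d.toNat).length = n * d.toNat := by
      rw [List.length_drop, hp]; omega
    have henum : PySem.List.enumerate p (m * d)
        = PySem.List.enumerate (p.take d.toNat) (m * d)
          ++ PySem.List.enumerate (p.drop d.toNat) ((m + 1) * d) := by
      conv_lhs => rw [hsplit]
      rw [PySem.List.enumerate_append, hulen, hdt]
      ring_nf
    have hblock := pvBlockFilter d t hd (p.take d.toNat) m 0 le_rfl (by rw [hulen, hdt]; omega)
    simp only [add_zero] at hblock
    have hrec := ih (p.drop d.toNat) (m + 1) hvlen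
    have hfsucc : ∀ (j : Nat),
        ((p.drop d.toNat).drop (j * d.toNat)).take t.toNat
          = (p.drop (Nat.succ j * d.toNat)).take t.toNat := by
      intro j; rw [List.drop_drop,
        show d.toNat + j * d.toNat = Nat.succ j * d.toNat from by simp only [Nat.succ_mul]; ring]
    have hgsucc : ∀ (j : Nat),
        ((p.drop d.toNat).drop (j * d.toNat + t.toNat)).take (d.toNat - t.toNat)
          = (p.drop (Nat.succ j * d.toNat + t.toNat)).take (d.toNat - t.toNat) := by
      intro j; rw [List.drop_drop,
        show d.toNat + (j * d.toNat + t.toNat) = Nat.succ j * d.toNat + t.toNat from by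
          simp only [Nat.succ_mul]; ring]
    constructor
    · rw [henum, List.filter_append, List.map_append, hblock.1, hrec.1,
        List.range_succ_eq_map, List.flatMap_cons, List.flatMap_map]
      congr 1
      · -- head block prefix
        rw [Nat.zero_mul, List.drop_zero, show (t - 0).toNat = t.toNat by omega,
          List.take_take, Nat.min_eq_left (by omega)]
      · exact List.flatMap_congr (fun j _ => hfsucc j)
    · rw [henum, List.filter_append, List.map_append, hblock.2, hrec.2,
        List.range_succ_eq_map, List.flatMap_cons, List.flatMap_map]
      congr 1
      · -- head block suffix
        rw [Nat.zero_mul, Nat.zero_add, show (t - 0).toNat = t.toNat by omega, List.drop_take]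
      · exact List.flatMap_congr (fun j _ => hgsucc j)

-- One slice of A rewritten as a drop/take of the common full-block prefix.
theorem pvSliceTrain (data : List Int) (T S : Int) (hT : 0 ≤ T) (hS : 0 ≤ S) (hd : 0 < T + S)
    (j : Nat) (hj : j < data.length / (T + S).toNat) :
    PySem.List.slice data (some ((0 + (j : Int)) * (T + S)))
        (some ((0 + (j : Int)) * (T + S) + T))
      = ((data.take (data.length / (T + S).toNat * (T + S).toNat)).drop
          (j * (T + S).toNat)).take T.toNat := by
  have hdt : (((T + S).toNat : Int)) = T + S := Int.toNat_of_nonneg (le_of_lt hd)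
  have htt : ((T.toNat : Int)) = T := Int.toNat_of_nonneg hT
  have e1 : (0 + (j : Int)) * (T + S) = ((j * (T + S).toNat : Nat) : Int) := by
    push_cast [hdt]; ring
  have e2 : (0 + (j : Int)) * (T + S) + T
      = ((j * (T + S).toNat + T.toNat : Nat) : Int) := by
    push_cast [hdt, htt]; ring
  have h1 : (j + 1) * (T + S).toNat ≤ data.length / (T + S).toNat * (T + S).toNat :=
    Nat.mul_le_mul_right _ hj
  have h2 : (j + 1) * (T + S).toNat = j * (T + S).toNat + (T + S).toNat := by ring
  rw [e2, e1, PySem.List.slice_natCast, Nat.add_sub_cancel_left, List.drop_take,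
    List.take_take, Nat.min_eq_left (by omega)]

theorem pvSliceTest (data : List Int) (T S : Int) (hT : 0 ≤ T) (hS : 0 ≤ S) (hd : 0 < T + S)
    (j : Nat) (hj : j < data.length / (T + S).toNat) :
    PySem.List.slice data (some ((0 + (j : Int)) * (T + S) + T))
        (some ((0 + (j : Int)) * (T + S) + (T + S)))
      = ((data.take (data.length / (T + S).toNat * (T + S).toNat)).drop
          (j * (T + S).toNat + T.toNat)).take ((T + S).toNat - T.toNat) := by
  have hdt : (((T + S).toNat : Int)) = T + S := Int.toNat_of_nonneg (le_of_lt hd)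
  have htt : ((T.toNat : Int)) = T := Int.toNat_of_nonneg hT
  have e1 : (0 + (j : Int)) * (T + S) + T
      = ((j * (T + S).toNat + T.toNat : Nat) : Int) := by
    push_cast [hdt, htt]; ring
  have e2 : (0 + (j : Int)) * (T + S) + (T + S)
      = ((j * (T + S).toNat + (T + S).toNat : Nat) : Int) := by
    push_cast [hdt]; ring
  have h1 : (j + 1) * (T + S).toNat ≤ data.length / (T + S).toNat * (T + S).toNat :=
    Nat.mul_le_mul_right _ hj
  have h2 : (j + 1) * (T + S).toNat = j * (T + S).toNat + (T + S).toNat := by ring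
  rw [e2, e1, PySem.List.slice_natCast,
    show j * (T + S).toNat + (T + S).toNat - (j * (T + S).toNat + T.toNat)
      = (T + S).toNat - T.toNat from by omega,
    List.drop_take, List.take_take, Nat.min_eq_left (by omega)]

-- ===== VERDICT (by name: the statement is the Claim_ definition above) =====
theorem SplitTrainAndTest_spec : Claim_equal_SplitTrainAndTest := by
  intro data T S _ hpre
  obtain ⟨hT, hS, hd⟩ := hpre
  have hdt : (((T + S).toNat : Int)) = T + S := Int.toNat_of_nonneg (le_of_lt hd)
  have hfd : PySem.Int.floordiv (data.length : Int) (T + S)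
      = ((data.length / (T + S).toNat : Nat) : Int) := by
    rw [← hdt, PySem.Int.floordiv_natCast]; simp
  have hcut : ((data.length / (T + S).toNat : Nat) : Int) * (T + S)
      = ((data.length / (T + S).toNat * (T + S).toNat : Nat) : Int) := by
    push_cast [hdt]; ring
  have hplen : (data.take (data.length / (T + S).toNat * (T + S).toNat)).length
      = data.length / (T + S).toNat * (T + S).toNat := by
    rw [List.length_take]
    exact Nat.min_eq_left (Nat.div_mul_le_self _ _)
  have hchunks := pvChunks (T + S) T hT (by omega) hd
      (data.length / (T + S).toNat)
      (data.take (data.length / (T + S).toNat * (T + S).toNat)) 0 hplen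
  rw [zero_mul] at hchunks
  show _ = SplitTrainAndTest_alt data T S
  simp only [SplitTrainAndTest, SplitTrainAndTest_alt]
  rw [hfd, hcut, PySem.List.slice_to_natCast, PySem.List.pyRange_one]
  rw [show (((data.length / (T + S).toNat : Nat) : Int) - 0).toNat
      = data.length / (T + S).toNat by rw [Int.sub_zero, Int.toNat_natCast]]
  rw [List.foldl_map, pvFoldlAppendPair, pvFoldlRoute, hchunks.1, hchunks.2]
  simp only [List.nil_append, Prod.mk.injEq]
  constructor
  · exact List.flatMap_congr (fun j hj =>
      pvSliceTrain data T S hT hS hd j (List.mem_range.mp hj))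
  · exact List.flatMap_congr (fun j hj =>
      pvSliceTest data T S hT hS hd j (List.mem_range.mp hj))
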